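-- pv_equiv track=rewrite | github.com/paul-minder/advent-of-code-2024 | 01/solve.py | solve_second_part
-- ===== SOURCE A (Python) =====
-- from collections import Counter
--
-- def solve_second_part(a, b):
--     numbers_in_a = set(a)
--     occurences_in_b = Counter(b)
--     similarity = 0
--     for number in a:
--         if number in occurences_in_b:
--             similarity += occurences_in_b[number] * number
--     return similarity
-- ===== SOURCE B (Python) =====
-- from collections import Counter
--
-- def solve_second_part(a, b):
--     ca = Counter(a)
--     cb = Counter(b)
--     total = 0
--     for number, count_a in ca.items():
--         total += number * count_a * cb.get(number, 0)
--     return total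
-- ===== Notes on version B (the rewrite author's own statement) =====
-- stated objective: alternative
-- what changed: B aggregates the a-side by value first (Counter(a)) and walks the distinct values once, adding number*count_a*count_b, instead of A's per-element pass over a with a membership test.
import Mathlib
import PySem

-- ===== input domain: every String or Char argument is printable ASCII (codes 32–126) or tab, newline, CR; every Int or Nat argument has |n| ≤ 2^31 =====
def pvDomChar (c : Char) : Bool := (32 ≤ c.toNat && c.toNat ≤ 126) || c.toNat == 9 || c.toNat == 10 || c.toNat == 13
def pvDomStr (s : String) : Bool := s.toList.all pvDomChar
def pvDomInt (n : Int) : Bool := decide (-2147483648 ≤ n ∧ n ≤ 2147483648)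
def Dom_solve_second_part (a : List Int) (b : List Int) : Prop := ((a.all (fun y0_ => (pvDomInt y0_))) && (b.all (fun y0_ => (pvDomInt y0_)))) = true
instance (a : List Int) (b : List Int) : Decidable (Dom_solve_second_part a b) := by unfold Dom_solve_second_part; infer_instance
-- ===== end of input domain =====

-- B aggregates the a-side by value first (Counter(a)) and walks the distinct values once,
-- adding number * count_a * count_b, instead of A's per-element pass over a with a membership test.

-- ===== PORT A =====
def solve_second_part (a : List Int) (b : List Int) : Int :=
  let _numbers_in_a := PySem.Set.ofList a  -- set(a): built by A but never used
  let occurences_in_b := PySem.Dict.counter b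
  a.foldl (fun similarity number =>
    if occurences_in_b.contains number then
      similarity + occurences_in_b.getD number 0 * number
    else similarity) 0

-- ===== PORT B =====
def solve_second_part_alt (a : List Int) (b : List Int) : Int :=
  let ca := PySem.Dict.counter a
  let cb := PySem.Dict.counter b
  ca.items.foldl (fun total kv => total + kv.1 * kv.2 * cb.getD kv.1 0) 0

-- ===== PRECONDITION & SPEC =====
def Spec_solve_second_part (a : List Int) (b : List Int) (out : Int) : Prop := out = solve_second_part_alt a b
instance (a : List Int) (b : List Int) (out : Int) : Decidable (Spec_solve_second_part a b out) := by unfold Spec_solve_second_part; infer_instance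

-- ===== CLAIM (what is proved, stated in full; the proofs are below) =====
def Claim_equal_solve_second_part : Prop := ∀ (a : List Int) (b : List Int), Dom_solve_second_part a b → Spec_solve_second_part a b (solve_second_part a b)

-- ===== LEMMAS AND PROOFS =====

-- On a nodup list containing x, a sum that is c at x and 0 elsewhere is c.
theorem pv_sum_single {α : Type} [DecidableEq α] (d : List α) (hd : d.Nodup) (x : α)
    (hx : x ∈ d) (c : Int) :
    (d.map (fun k => if k = x then c else 0)).sum = c := by
  induction d with
  | nil => cases hx
  | cons y t ih =>
    rcases List.mem_cons.mp hx with h | h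
    · subst h
      simp only [List.map_cons, List.sum_cons, if_pos]
      have hnot : ∀ k ∈ t, (if k = x then c else (0:Int)) = 0 := by
        intro k hk
        have : k ≠ x := fun e => (List.nodup_cons.mp hd).1 (e ▸ hk)
        simp [this]
      rw [List.map_congr_left hnot]
      simp
    · have hy : y ≠ x := fun e => (List.nodup_cons.mp hd).1 (e ▸ h)
      simp only [List.map_cons, List.sum_cons, if_neg hy]
      rw [ih (List.nodup_cons.mp hd).2 h]
      ring

-- Summing f over l equals summing count-weighted f over any nodup superset of l's elements.
theorem pv_sum_by_count {α : Type} [DecidableEq α] (l d : List α) (hd : d.Nodup)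
    (hl : ∀ x ∈ l, x ∈ d) (f : α → Int) :
    (l.map f).sum = (d.map (fun k => (l.count k : Int) * f k)).sum := by
  induction l with
  | nil => simp
  | cons x t ih =>
    have hsplit : ∀ k ∈ d, ((x :: t).count k : Int) * f k
        = (t.count k : Int) * f k + (if k = x then f x else 0) := by
      intro k _
      by_cases h : k = x
      · subst h; simp; ring
      · simp [List.count_cons, h]
        exact Or.inl fun e => h e.symm
    rw [List.map_congr_left hsplit]
    have : (d.map (fun k => (t.count k : Int) * f k + (if k = x then f x else 0))).sum
        = (d.map (fun k => (t.count k : Int) * f k)).sum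
          + (d.map (fun k => if k = x then f x else 0)).sum := by
      simp [List.sum_map_add]
    rw [this, ← ih (fun y hy => hl y (List.mem_cons_of_mem x hy)),
        pv_sum_single d hd x (hl x List.mem_cons_self) (f x)]
    simp [add_comm]

-- ===== VERDICT (by name: the statement is the Claim_ definition above) =====
theorem solve_second_part_spec : Claim_equal_solve_second_part := by
  intro a b _
  show solve_second_part a b = solve_second_part_alt a b
  unfold solve_second_part solve_second_part_alt
  simp only [PySem.Dict.items_counter]
  -- A's loop: drop the membership guard (when number ∉ b the count is 0)
  rw [PySem.List.foldl_congr_mem _ _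
      (fun similarity number => similarity + (b.count number : Int) * number) _
      (by
        intro acc x _
        rw [PySem.Dict.contains_counter, PySem.Dict.getD_counter]
        by_cases h : b.contains x = true
        · simp only [if_pos h]
        · have hz : b.count x = 0 := List.count_eq_zero.mpr (by simpa using h)
          simp only [if_neg h, hz]
          simp)]
  rw [PySem.List.foldl_add a (fun number => (b.count number : Int) * number) 0,
      PySem.List.foldl_add]
  rw [List.map_map]
  have := pv_sum_by_count a (PySem.Set.ofList a) (PySem.Set.nodup_ofList a)
      (fun x hx => (PySem.Set.mem_ofList a x).mpr hx)
      (fun number => (b.count number : Int) * number)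
  rw [this]
  simp only [zero_add]
  refine congrArg List.sum (List.map_congr_left ?_)
  intro k _
  simp only [Function.comp_apply, PySem.Dict.getD_counter]
  ring
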